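-- pv_equiv track=rewrite | github.com/PixLzzz/footics | backend/event_detector.py | _build_ball_gaps
-- ===== SOURCE A (Python) =====
-- def _build_ball_gaps(all_player_ts, ball_ts_set):
--     """For each timestamp without ball detection, compute gap duration until ball reappears."""
--     ball_gaps = {}
--     for i, t in enumerate(all_player_ts):
--         if t not in ball_ts_set:
--             gap_end = t
--             for t2 in all_player_ts[i:]:
--                 if t2 in ball_ts_set:
--                     gap_end = t2
--                     break
--                 gap_end = t2
--             ball_gaps[t] = gap_end - t
--     return ball_gaps
-- ===== SOURCE B (Python) =====
-- def _build_ball_gaps(all_player_ts, ball_ts_set):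
--     """Single backward pass: for each position, the next timestamp with ball
--     detection (fallback: the overall last timestamp); then one forward pass
--     building the gaps dict."""
--     nxt = []
--     cur = None
--     fallback = all_player_ts[-1] if all_player_ts else None
--     for t in reversed(all_player_ts):
--         if t in ball_ts_set:
--             cur = t
--         nxt.append(cur if cur is not None else fallback)
--     nxt.reverse()
--     ball_gaps = {}
--     for t, g in zip(all_player_ts, nxt):
--         if t not in ball_ts_set:
--             ball_gaps[t] = g - t
--     return ball_gaps
-- ===== Notes on version B (the rewrite author's own statement) =====
-- stated objective: faster
-- what changed: Replaced the per-timestamp forward rescan of the suffix by one backward pass that records, for every position, the next ball timestamp (fallback: the overall last timestamp), followed by a single forward pass building the dict.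
import Mathlib
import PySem

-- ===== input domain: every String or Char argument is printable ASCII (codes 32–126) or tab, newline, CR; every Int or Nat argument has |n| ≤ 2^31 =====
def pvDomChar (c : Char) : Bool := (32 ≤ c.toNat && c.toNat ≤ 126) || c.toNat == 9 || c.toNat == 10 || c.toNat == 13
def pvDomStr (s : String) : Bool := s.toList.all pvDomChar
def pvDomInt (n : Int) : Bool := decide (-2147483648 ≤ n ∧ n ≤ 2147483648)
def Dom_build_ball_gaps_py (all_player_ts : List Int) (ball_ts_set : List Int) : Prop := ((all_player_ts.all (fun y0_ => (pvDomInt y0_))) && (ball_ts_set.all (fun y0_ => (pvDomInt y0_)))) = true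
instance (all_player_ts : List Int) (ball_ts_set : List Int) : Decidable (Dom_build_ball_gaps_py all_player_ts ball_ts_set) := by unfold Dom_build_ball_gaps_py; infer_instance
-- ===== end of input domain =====

-- B replaces A's per-timestamp forward rescan (O(n^2)) by one backward pass computing the
-- next ball timestamp per position (O(n)); return values are proved identical.

-- ===== PORT A =====
-- inner loop: `gap_end = t; for t2 in all_player_ts[i:]: ...` — returns the final gap_end
def pvInnerA (ball : List Int) (ge : Int) : List Int → Int
  | [] => ge
  | t2 :: rest => if ball.contains t2 then t2 else pvInnerA ball t2 rest

def build_ball_gaps_py (all_player_ts : List Int) (ball_ts_set : List Int) : List (Int × Int) :=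
  ((PySem.List.enumerate all_player_ts).foldl
    (fun (d : PySem.Dict Int Int) (p : Int × Int) =>
      if ball_ts_set.contains p.2 then d
      else
        let gap_end := pvInnerA ball_ts_set p.2 (PySem.List.slice all_player_ts (some p.1) none)
        d.insert p.2 (gap_end - p.2))
    PySem.Dict.empty).items

-- ===== PORT B =====
-- backward pass: returns (cur, nxt-list); cur = nearest ball timestamp in the suffix,
-- each entry of the list is `cur if cur is not None else fallback` at that position
def pvNxtB (ball : List Int) (fb : Int) : List Int → Option Int × List Int
  | [] => (none, [])
  | t :: rest =>
    let pr := pvNxtB ball fb rest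
    let cur := if ball.contains t then some t else pr.1
    (cur, cur.getD fb :: pr.2)

def build_ball_gaps_py_alt (all_player_ts : List Int) (ball_ts_set : List Int) : List (Int × Int) :=
  -- `fallback = all_player_ts[-1] if all_player_ts else None`: the default 0 is never
  -- consulted (the loop below runs only when the list is nonempty)
  let fb := all_player_ts.getLastD 0
  let nxt := (pvNxtB ball_ts_set fb all_player_ts).2
  ((all_player_ts.zip nxt).foldl
    (fun (d : PySem.Dict Int Int) (p : Int × Int) =>
      if ball_ts_set.contains p.1 then d else d.insert p.1 (p.2 - p.1))
    PySem.Dict.empty).items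

-- ===== PRECONDITION & SPEC =====
def Spec_build_ball_gaps_py (all_player_ts : List Int) (ball_ts_set : List Int) (out : List (Int × Int)) : Prop := out = build_ball_gaps_py_alt all_player_ts ball_ts_set
instance (all_player_ts : List Int) (ball_ts_set : List Int) (out : List (Int × Int)) : Decidable (Spec_build_ball_gaps_py all_player_ts ball_ts_set out) := by unfold Spec_build_ball_gaps_py; infer_instance

-- ===== CLAIM (what is proved, stated in full; the proofs are below) =====
def Claim_equal_build_ball_gaps_py : Prop := ∀ (all_player_ts : List Int) (ball_ts_set : List Int), Dom_build_ball_gaps_py all_player_ts ball_ts_set → Spec_build_ball_gaps_py all_player_ts ball_ts_set (build_ball_gaps_py all_player_ts ball_ts_set)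

-- ===== LEMMAS AND PROOFS =====

-- A's outer loop, restated as structural recursion on the remaining suffix
def pvLoopA (ball : List Int) : PySem.Dict Int Int → List Int → PySem.Dict Int Int
  | d, [] => d
  | d, t :: rest =>
    pvLoopA ball (if ball.contains t then d else d.insert t (pvInnerA ball t (t :: rest) - t)) rest

theorem pvGetLastD_congr {α : Type} (l : List α) (hl : l ≠ []) (a b : α) :
    l.getLastD a = l.getLastD b := by
  rw [List.getLastD_eq_getLast?, List.getLastD_eq_getLast?]
  cases h' : l.getLast? with
  | none => exact absurd (List.getLast?_eq_none_iff.mp h') hl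
  | some x => rfl

-- the enumerate+slice fold of port A is the suffix recursion pvLoopA
theorem pvAfold_eq (ball xs : List Int) :
    ∀ (k : Nat) (s : List Int), s = xs.drop k → ∀ d,
      (PySem.List.enumerate s (k : Int)).foldl
        (fun (d : PySem.Dict Int Int) (p : Int × Int) =>
          if ball.contains p.2 then d
          else
            let gap_end := pvInnerA ball p.2 (PySem.List.slice xs (some p.1) none)
            d.insert p.2 (gap_end - p.2)) d
      = pvLoopA ball d s := by
  intro k s
  induction s generalizing k with
  | nil => intro _ d; simp [PySem.List.enumerate_nil, pvLoopA]
  | cons t rest ih =>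
    intro hs d
    have hrest : rest = xs.drop (k + 1) := by
      rw [← List.tail_drop, ← hs]
      rfl
    rw [PySem.List.enumerate_cons, List.foldl_cons]
    have hslice : PySem.List.slice xs (some (k : Int)) none = t :: rest := by
      rw [PySem.List.slice_from_natCast, ← hs]
    have hk1 : ((k : Int) + 1) = ((k + 1 : Nat) : Int) := by push_cast; ring
    rw [hk1, ih (k + 1) hrest]
    simp only [pvLoopA, hslice]

-- pvInnerA on a suffix equals the backward-pass value, provided fb is that suffix's last element
theorem pvInner_eq_nxt (ball : List Int) (fb : Int) :
    ∀ (s : List Int) (g : Int), s.getLastD g = fb →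
      pvInnerA ball g s = ((pvNxtB ball fb s).1).getD fb := by
  intro s
  induction s with
  | nil => intro g h; simpa [pvInnerA, pvNxtB] using h
  | cons t2 rest ih =>
    intro g h
    rw [List.getLastD_cons] at h
    by_cases hc : ball.contains t2 = true
    · simp only [pvInnerA, pvNxtB, hc, ite_true, Option.getD_some]
    · rw [Bool.not_eq_true] at hc
      simp only [pvInnerA, pvNxtB, hc, Bool.false_eq_true, ite_false]
      exact ih t2 h

-- the two suffix loops agree whenever fb is the last element of the suffix
theorem pvLoop_eq (ball : List Int) (fb : Int) :
    ∀ (s : List Int), s.getLastD fb = fb → ∀ (d : PySem.Dict Int Int),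
      pvLoopA ball d s
      = (s.zip (pvNxtB ball fb s).2).foldl
          (fun (d : PySem.Dict Int Int) (p : Int × Int) =>
            if ball.contains p.1 then d else d.insert p.1 (p.2 - p.1)) d := by
  intro s
  induction s with
  | nil => intro _ d; simp [pvLoopA, pvNxtB]
  | cons t rest ih =>
    intro h d
    rw [List.getLastD_cons] at h
    have hrest : rest.getLastD fb = fb := by
      cases hr : rest with
      | nil => simp
      | cons a l =>
        rw [← h, hr]
        exact (pvGetLastD_congr (a :: l) (by simp) fb t)
    have hinner : pvInnerA ball t (t :: rest) = ((pvNxtB ball fb (t :: rest)).1).getD fb := by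
      apply pvInner_eq_nxt
      rw [List.getLastD_cons]; exact h
    by_cases hc : ball.contains t = true
    · simp only [pvLoopA, pvNxtB, hc, ite_true, List.zip_cons_cons, List.foldl_cons,
        Option.getD_some]
      exact ih hrest d
    · rw [Bool.not_eq_true] at hc
      simp only [pvLoopA, pvNxtB, hc, Bool.false_eq_true, ite_false,
        List.zip_cons_cons, List.foldl_cons]
      rw [ih hrest, hinner]
      simp only [pvNxtB, hc, Bool.false_eq_true, ite_false]

-- ===== VERDICT (by name: the statement is the Claim_ definition above) =====
theorem build_ball_gaps_py_spec : Claim_equal_build_ball_gaps_py := by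
  intro xs ball _
  unfold Spec_build_ball_gaps_py build_ball_gaps_py build_ball_gaps_py_alt
  have hfold := pvAfold_eq ball xs 0 xs (by simp) PySem.Dict.empty
  simp only [Int.natCast_zero] at hfold
  rw [hfold]
  congr 1
  apply pvLoop_eq
  cases hx : xs with
  | nil => simp
  | cons a l =>
    rw [← hx]
    exact pvGetLastD_congr xs (by simp [hx]) (xs.getLastD 0) 0
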